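-- pv_equiv track=rewrite | github.com/Azurisky/Datacenter_Scale_Computing_Project | project-2-spark/PartB/Part2/run.py | transform_string
-- ===== SOURCE A (Python) =====
-- def transform_string(string):
--     stop_words = set(["a","about","above","after","again",
--         "against","all","am","an","and","any","are","arent","as","at","be","because","been","before",
--         "being","below","between","both","but","by","cant","cannot","could","couldnt","did","didnt","do",
--         "does","doesnt","doing","dont","down","during","each","few","for","from","further","had",
--         "hadnt","has","hasnt","have","havent","having","he","hed","hell","hes","her","here","heres","hers",
--         "herself","him","himself","his","how","hows","i","id","ill","im","ive","if","in","into","is",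
--         "isnt","it","its","its","itself","lets","me","more","most","mustnt","my","myself","no","nor",
--         "not","of","off","on","once","only","or","other","ought","our","ours", "ourselves","out","over","own",
--         "same","shant","she","shed","shell","shes","should","shouldnt","so","some","such","than","that","thats",
--         "the","their","theirs","them","themselves","then","there","theres","these","they","theyd","theyll","theyre",
--         "theyve","this","those","through","to","too","under","until","up","very","was","wasnt","we","wed","well",
--         "were","weve","were","werent","what","whats","when","whens","where","wheres","which","while","who","whos",
--         "whom","why","whys","with","wont","would","wouldnt","you","youd","youll","youre","youve","your","yours",
--         "yourself","yourselves"])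
--     string = ' '.join(string.split())
--     lower_string = ''.join(c.lower() for c in string if c.isalpha() or c == ' ')
--     simple_string = " ".join([x for x in lower_string.split() if x not in stop_words and len(x) > 0])
--     return simple_string
-- ===== SOURCE B (Python) =====
-- _STOP_TEXT = (
--     "a about above after again against all am an and any are "
--     "arent as at be because been before being below between both but "
--     "by cant cannot could couldnt did didnt do does doesnt doing dont "
--     "down during each few for from further had hadnt has hasnt have "
--     "havent having he hed hell hes her here heres hers herself him "
--     "himself his how hows i id ill im ive if in into "
--     "is isnt it its its itself lets me more most mustnt my "
--     "myself no nor not of off on once only or other ought "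
--     "our ours ourselves out over own same shant she shed shell shes "
--     "should shouldnt so some such than that thats the their theirs them "
--     "themselves then there theres these they theyd theyll theyre theyve this those "
--     "through to too under until up very was wasnt we wed well "
--     "were weve were werent what whats when whens where wheres which while "
--     "who whos whom why whys with wont would wouldnt you youd youll "
--     "youre youve your yours yourself yourselves"
-- )
--
--
-- def transform_string(string):
--     stop_words = set(_STOP_TEXT.split())
--     # single left-to-right scan with a current-word buffer: an alpha char is
--     # lowered into the buffer, whitespace flushes it (dropping stop words at
--     # flush time), any other char is skipped so surrounding letters join up
--     words = []
--     buf = []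
--     for c in string:
--         if c.isalpha():
--             buf.append(c.lower())
--         elif c.isspace():
--             if buf:
--                 w = ''.join(buf)
--                 if w not in stop_words:
--                     words.append(w)
--             buf = []
--     if buf:
--         w = ''.join(buf)
--         if w not in stop_words:
--             words.append(w)
--     return ' '.join(words)
-- ===== Notes on version B (the rewrite author's own statement) =====
-- stated objective: alternative
-- what changed: Replaced A's three-pass split/join + char-filter + split/filter pipeline by a single left-to-right scan with a current-word buffer (alpha chars are lowered into the buffer, whitespace flushes it and drops stop words at flush time, other chars are skipped), with the stop-word set built once by splitting a single text constant.
import Mathlib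
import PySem

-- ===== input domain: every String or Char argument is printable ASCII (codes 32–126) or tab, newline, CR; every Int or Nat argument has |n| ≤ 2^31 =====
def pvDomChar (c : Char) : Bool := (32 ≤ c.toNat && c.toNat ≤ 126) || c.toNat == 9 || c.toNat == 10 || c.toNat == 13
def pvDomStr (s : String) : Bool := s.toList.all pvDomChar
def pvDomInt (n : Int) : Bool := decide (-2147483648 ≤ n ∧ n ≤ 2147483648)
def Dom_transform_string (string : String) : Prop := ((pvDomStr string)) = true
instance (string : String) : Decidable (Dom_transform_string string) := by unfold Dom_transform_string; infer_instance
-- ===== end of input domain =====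

-- B replaces A's three split/join/filter passes by one left-to-right scan with a
-- current-word buffer that drops stop words at flush time (alternative
-- decomposition; same return value, no speed claim).

-- ===== PORT A =====
-- A's stop-word set (Python: set(["a", "about", ...]))
def pvStopWordList : List String :=
  (["a","about","above","after","again",
    "against","all","am","an","and","any","are","arent","as","at","be","because","been","before",
    "being","below","between","both","but","by","cant","cannot","could","couldnt","did","didnt","do",
    "does","doesnt","doing","dont","down","during","each","few","for","from","further","had",
    "hadnt","has","hasnt","have","havent","having","he","hed","hell","hes","her","here","heres","hers",
    "herself","him","himself","his","how","hows","i","id","ill","im","ive","if","in","into","is",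
    "isnt","it","its","its","itself","lets","me","more","most","mustnt","my","myself","no","nor",
    "not","of","off","on","once","only","or","other","ought","our","ours","ourselves","out","over","own",
    "same","shant","she","shed","shell","shes","should","shouldnt","so","some","such","than","that","thats",
    "the","their","theirs","them","themselves","then","there","theres","these","they","theyd","theyll","theyre",
    "theyve","this","those","through","to","too","under","until","up","very","was","wasnt","we","wed","well",
    "were","weve","were","werent","what","whats","when","whens","where","wheres","which","while","who","whos",
    "whom","why","whys","with","wont","would","wouldnt","you","youd","youll","youre","youve","your","yours",
    "yourself","yourselves"] : List String)

def pvStopWords : PySem.Set (List Char) :=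
  PySem.Set.ofList (pvStopWordList.map String.toList)

-- A's final list-comprehension filter 'x not in stop_words and len(x) > 0'
def pvKeep (w : List Char) : Bool :=
  !(PySem.Set.contains pvStopWords w) && decide (0 < w.length)

def transform_string (string : String) : String :=
  -- string = ' '.join(string.split())
  let s1 : List Char := PySem.Chars.join [' '] (PySem.Chars.split₀ string.toList)
  -- lower_string = ''.join(c.lower() for c in string if c.isalpha() or c == ' ')
  let lower_string : List Char :=
    (s1.filter (fun c => PySem.Chars.isalpha c || c == ' ')).map PySem.Chars.lowerChar
  -- simple_string = " ".join([x for x in lower_string.split() if x not in stop_words and len(x) > 0])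
  String.mk (PySem.Chars.join [' '] ((PySem.Chars.split₀ lower_string).filter pvKeep))

-- ===== PORT B =====
-- B's stop words, one text constant of adjacent literals (Python: _STOP_TEXT)
def pvStopText : List Char :=
  "a about above after again against all am an and any are ".toList ++
    "arent as at be because been before being below between both but ".toList ++
    "by cant cannot could couldnt did didnt do does doesnt doing dont ".toList ++
    "down during each few for from further had hadnt has hasnt have ".toList ++
    "havent having he hed hell hes her here heres hers herself him ".toList ++
    "himself his how hows i id ill im ive if in into ".toList ++
    "is isnt it its its itself lets me more most mustnt my ".toList ++
    "myself no nor not of off on once only or other ought ".toList ++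
    "our ours ourselves out over own same shant she shed shell shes ".toList ++
    "should shouldnt so some such than that thats the their theirs them ".toList ++
    "themselves then there theres these they theyd theyll theyre theyve this those ".toList ++
    "through to too under until up very was wasnt we wed well ".toList ++
    "were weve were werent what whats when whens where wheres which while ".toList ++
    "who whos whom why whys with wont would wouldnt you youd youll ".toList ++
    "youre youve your yours yourself yourselves".toList

-- stop_words = set(_STOP_TEXT.split())
def pvStopB : PySem.Set (List Char) :=
  PySem.Set.ofList (PySem.Chars.split₀ pvStopText)

def transform_string_alt (string : String) : String :=
  -- the scan: alpha chars lower into buf, whitespace flushes (dropping stop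
  -- words), everything else is skipped
  let st : List (List Char) × List Char :=
    string.toList.foldl (fun st c =>
      if PySem.Chars.isalpha c then (st.1, st.2 ++ [PySem.Chars.lowerChar c])
      else if PySem.Chars.isspace c then
        ((if st.2.isEmpty then st.1
          else if PySem.Set.contains pvStopB st.2 then st.1 else st.1 ++ [st.2]),
         ([] : List Char))
      else st) ([], [])
  -- final flush of the last buffer
  let words : List (List Char) :=
    if st.2.isEmpty then st.1
    else if PySem.Set.contains pvStopB st.2 then st.1 else st.1 ++ [st.2]
  -- return ' '.join(words)
  String.mk (PySem.Chars.join [' '] words)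

-- ===== PRECONDITION & SPEC =====
def Spec_transform_string (string : String) (out : String) : Prop := out = transform_string_alt string
instance (string : String) (out : String) : Decidable (Spec_transform_string string out) := by unfold Spec_transform_string; infer_instance

-- ===== CLAIM (what is proved, stated in full; the proofs are below) =====
def Claim_equal_transform_string : Prop := ∀ (string : String), Dom_transform_string string → Spec_transform_string string (transform_string string)

-- ===== LEMMAS AND PROOFS =====

-- a clean structural version of Python's str.split() scanner (prefix kept in order)
def pvSW (pref : List Char) : List Char → List (List Char)
  | [] => if pref = [] then [] else [pref]
  | c :: rest =>
      if PySem.Chars.isspace c then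
        (if pref = [] then pvSW [] rest else pref :: pvSW [] rest)
      else pvSW (pref ++ [c]) rest

theorem go_eq (s cur : List Char) (acc : List (List Char)) :
    PySem.Chars.split₀.go s cur acc = acc.reverse ++ pvSW cur.reverse s := by
  induction s generalizing cur acc with
  | nil =>
      simp only [PySem.Chars.split₀.go, pvSW, List.isEmpty_iff]
      by_cases h : cur = [] <;> simp [h]
  | cons c rest ih =>
      simp only [PySem.Chars.split₀.go, pvSW, List.isEmpty_iff]
      by_cases hs : PySem.Chars.isspace c
      · by_cases h : cur = [] <;> simp [hs, h, ih]
      · simp [hs, ih]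

theorem split₀_eq_pvSW (s : List Char) : PySem.Chars.split₀ s = pvSW [] s := by
  simp [PySem.Chars.split₀, go_eq]

-- character facts (isupper/islower/isspace are range checks; lowerChar shifts A–Z)
theorem toNat_ofNat_lt (n : Nat) (h : n < 55296) : (Char.ofNat n).toNat = n := by
  unfold Char.ofNat
  rw [dif_pos (by simp [Nat.isValidChar]; omega)]
  simp [Char.ofNatAux]

theorem alpha_not_space (c : Char) (h : PySem.Chars.isalpha c = true) :
    PySem.Chars.isspace c = false := by
  simp [PySem.Chars.isalpha, PySem.Chars.isupper, PySem.Chars.islower, Char.le_def,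
    UInt32.le_iff_toNat_le, Char.toNat_val] at h
  simp only [PySem.Chars.isspace, Bool.or_eq_false_iff, Bool.and_eq_false_iff,
    decide_eq_false_iff_not]
  omega

theorem space_lower (c : Char) (h : PySem.Chars.isspace c = true) :
    PySem.Chars.lowerChar c = c := by
  simp only [PySem.Chars.isspace, Bool.or_eq_true_iff, Bool.and_eq_true_iff,
    decide_eq_true_iff] at h
  simp only [PySem.Chars.lowerChar, PySem.Chars.isupper]
  rw [if_neg]
  simp only [Bool.and_eq_true_iff, decide_eq_true_iff, Char.le_def,
    UInt32.le_iff_toNat_le, Char.toNat_val, not_and]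
  have hA : 'A'.toNat = 65 := rfl
  have hZ : 'Z'.toNat = 90 := rfl
  rw [hA, hZ]
  omega

theorem lower_alpha_not_space (c : Char) (h : PySem.Chars.isalpha c = true) :
    PySem.Chars.isspace (PySem.Chars.lowerChar c) = false := by
  simp [PySem.Chars.isalpha, PySem.Chars.isupper, PySem.Chars.islower, Char.le_def,
    UInt32.le_iff_toNat_le, Char.toNat_val] at h
  have hA : 'A'.toNat = 65 := rfl
  have hZ : 'Z'.toNat = 90 := rfl
  simp only [PySem.Chars.lowerChar, PySem.Chars.isupper]
  split
  · rename_i hu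
    simp only [Bool.and_eq_true_iff, decide_eq_true_iff, Char.le_def,
      UInt32.le_iff_toNat_le, Char.toNat_val, hA, hZ] at hu
    simp only [PySem.Chars.isspace, Bool.or_eq_false_iff, Bool.and_eq_false_iff,
      decide_eq_false_iff_not, toNat_ofNat_lt (c.toNat + 32) (by omega)]
    omega
  · simp only [PySem.Chars.isspace, Bool.or_eq_false_iff, Bool.and_eq_false_iff,
      decide_eq_false_iff_not]
    omega

-- the character-level transform both word lists are computed from
def pvF (s : List Char) : List Char :=
  (s.filter (fun c => PySem.Chars.isalpha c || PySem.Chars.isspace c)).map PySem.Chars.lowerChar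

def pvf (w : List Char) : List Char := (w.filter PySem.Chars.isalpha).map PySem.Chars.lowerChar

def pvH (ws : List (List Char)) : List (List Char) := (ws.map pvf).filter (· ≠ [])

theorem lemmaX (s : List Char) : ∀ pref, pvSW (pvf pref) (pvF s) = pvH (pvSW pref s) := by
  induction s with
  | nil =>
      intro pref
      rw [show pvF [] = [] from rfl, pvSW]
      by_cases h : pref = []
      · simp [h, pvf, pvH, pvSW]
      · by_cases hf : pvf pref = [] <;> simp [h, hf, pvH, pvSW]
  | cons c rest ih =>
      intro pref
      by_cases ha : PySem.Chars.isalpha c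
      · have hns := alpha_not_space c ha
        have hlns := lower_alpha_not_space c ha
        have h1 : pvF (c :: rest) = PySem.Chars.lowerChar c :: pvF rest := by
          simp [pvF, ha]
        have h2 : pvf (pref ++ [c]) = pvf pref ++ [PySem.Chars.lowerChar c] := by
          simp [pvf, ha]
        rw [h1]
        show pvSW (pvf pref) (PySem.Chars.lowerChar c :: pvF rest) = _
        rw [pvSW, if_neg (by simp [hlns]), ← h2, ih (pref ++ [c])]
        rw [show pvSW pref (c :: rest) = pvSW (pref ++ [c]) rest from by
          rw [pvSW, if_neg (by simp [hns])]]
      · by_cases hs : PySem.Chars.isspace c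
        · have h1 : pvF (c :: rest) = c :: pvF rest := by
            simp [pvF, hs, space_lower c hs]
          rw [h1, pvSW, if_pos hs]
          rw [show pvSW pref (c :: rest) = if pref = [] then pvSW [] rest
                else pref :: pvSW [] rest from by rw [pvSW, if_pos hs]]
          have ihnil : pvSW [] (pvF rest) = pvH (pvSW [] rest) := by
            have := ih []
            simpa [pvf] using this
          by_cases hp : pref = []
          · simp [hp, pvf, ihnil, pvH]
          · simp only [if_neg hp]
            by_cases hfp : pvf pref = []
            · simp [hfp, ihnil, pvH]
            · simp [hfp, ihnil, pvH]
        · have h1 : pvF (c :: rest) = pvF rest := by simp [pvF, ha, hs]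
          have h2 : pvf (pref ++ [c]) = pvf pref := by simp [pvf, ha]
          rw [h1, show pvSW pref (c :: rest) = pvSW (pref ++ [c]) rest from by
            rw [pvSW, if_neg (by simp [hs])], ← ih (pref ++ [c]), h2]

-- words produced by pvSW are nonempty and whitespace-free
theorem pvSW_words (s : List Char) : ∀ pref, (∀ c ∈ pref, PySem.Chars.isspace c = false) →
    ∀ w ∈ pvSW pref s, w ≠ [] ∧ ∀ c ∈ w, PySem.Chars.isspace c = false := by
  induction s with
  | nil =>
      intro pref hp w hw
      rw [pvSW] at hw
      by_cases h : pref = [] <;> simp [h] at hw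
      exact hw ▸ ⟨h, hp⟩
  | cons c rest ih =>
      intro pref hp w hw
      rw [pvSW] at hw
      by_cases hs : PySem.Chars.isspace c
      · rw [if_pos hs] at hw
        by_cases h : pref = []
        · rw [if_pos h] at hw; exact ih [] (by simp) w hw
        · rw [if_neg h] at hw
          rcases List.mem_cons.mp hw with h' | h'
          · exact h' ▸ ⟨h, hp⟩
          · exact ih [] (by simp) w h'
      · rw [if_neg hs] at hw
        exact ih (pref ++ [c]) (by
          intro x hx
          rcases List.mem_append.mp hx with h' | h'
          · exact hp x h'
          · simp at h'; exact h' ▸ (by simpa using hs)) w hw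

theorem sw_append (w : List Char) : ∀ pref t, (∀ c ∈ w, PySem.Chars.isspace c = false) →
    pvSW pref (w ++ t) = pvSW (pref ++ w) t := by
  induction w with
  | nil => intro pref t _; simp
  | cons c rest ih =>
      intro pref t h
      have hc : PySem.Chars.isspace c = false := h c (by simp)
      rw [List.cons_append, pvSW, if_neg (by simp [hc]), ih (pref ++ [c]) t
        (fun x hx => h x (by simp [hx]))]
      simp

theorem intercalate_single (sep w : List Char) : List.intercalate sep [w] = w := by
  simp [List.intercalate, List.intersperse]

theorem intercalate_cons2 (sep w w2 : List Char) (ws : List (List Char)) :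
    List.intercalate sep (w :: w2 :: ws)
      = w ++ (sep ++ List.intercalate sep (w2 :: ws)) := by
  simp [List.intercalate, List.intersperse]

theorem roundtrip (ws : List (List Char))
    (h : ∀ w ∈ ws, w ≠ [] ∧ ∀ c ∈ w, PySem.Chars.isspace c = false) :
    pvSW [] (List.intercalate [' '] ws) = ws := by
  induction ws with
  | nil => simp [List.intercalate, pvSW]
  | cons w rest ih =>
      have hw := h w (by simp)
      cases rest with
      | nil =>
          rw [intercalate_single]
          have h2 := sw_append w [] [] hw.2
          simp only [List.append_nil, List.nil_append] at h2
          rw [h2, pvSW, if_neg hw.1]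
      | cons w2 rest2 =>
          have h2 := sw_append w [] (' ' :: List.intercalate [' '] (w2 :: rest2)) hw.2
          simp only [List.nil_append] at h2
          rw [intercalate_cons2,
            show w ++ ([' '] ++ List.intercalate [' '] (w2 :: rest2)) =
              w ++ (' ' :: List.intercalate [' '] (w2 :: rest2)) from by simp,
            h2, pvSW, if_pos (by decide), if_neg hw.1]
          rw [ih (fun x hx => h x (by simp [hx]))]

-- B's split stop text is exactly A's word list, so the two sets coincide
set_option maxRecDepth 4000 in
theorem words_ok : (pvStopWordList.map String.toList).all
    (fun w => !w.isEmpty && w.all (fun c => !PySem.Chars.isspace c)) = true := by decide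

set_option maxRecDepth 4000 in
set_option maxHeartbeats 1000000 in
theorem text_eq : pvStopText = List.intercalate [' '] (pvStopWordList.map String.toList) := by
  decide

theorem stop_eq : pvStopB = pvStopWords := by
  unfold pvStopB pvStopWords
  rw [split₀_eq_pvSW, text_eq, roundtrip _ (by
    intro w hw
    have hb := words_ok
    rw [List.all_eq_true] at hb
    have := hb w hw
    simp only [Bool.and_eq_true_iff, Bool.not_eq_true',
      List.all_eq_true] at this
    exact ⟨fun h => by simp [h] at this, fun c hc => by simpa using this.2 c hc⟩)]

-- B's fold computes the pvKeep-filtered pvSW words over the transformed characters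
def pvStepB (st : List (List Char) × List Char) (c : Char) : List (List Char) × List Char :=
  if PySem.Chars.isalpha c then (st.1, st.2 ++ [PySem.Chars.lowerChar c])
  else if PySem.Chars.isspace c then
    ((if st.2.isEmpty then st.1
      else if PySem.Set.contains pvStopB st.2 then st.1 else st.1 ++ [st.2]),
     ([] : List Char))
  else st

def pvFinB (st : List (List Char) × List Char) : List (List Char) :=
  if st.2.isEmpty then st.1
  else if PySem.Set.contains pvStopB st.2 then st.1 else st.1 ++ [st.2]

theorem flushB (ws : List (List Char)) (buf : List Char) :
    pvFinB (ws, buf) = ws ++ (if buf = [] then [] else [buf]).filter pvKeep := by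
  by_cases hb : buf = []
  · simp [pvFinB, hb]
  · simp only [pvFinB, List.isEmpty_iff, if_neg hb]
    have hk : pvKeep buf = !(PySem.Set.contains pvStopB buf) := by
      simp [pvKeep, stop_eq, List.length_pos_iff, hb]
    rw [List.filter_cons, List.filter_nil]
    cases hc : PySem.Set.contains pvStopB buf
    · rw [hk, hc]; simp
    · rw [hk, hc]; simp

theorem bfoldB (s : List Char) : ∀ ws buf,
    pvFinB (s.foldl pvStepB (ws, buf)) = ws ++ (pvSW buf (pvF s)).filter pvKeep := by
  induction s with
  | nil =>
      intro ws buf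
      rw [List.foldl_nil, flushB, show pvF [] = [] from rfl, pvSW]
  | cons c rest ih =>
      intro ws buf
      by_cases ha : PySem.Chars.isalpha c
      · have h1 : pvF (c :: rest) = PySem.Chars.lowerChar c :: pvF rest := by simp [pvF, ha]
        rw [h1, List.foldl_cons,
          show pvStepB (ws, buf) c = (ws, buf ++ [PySem.Chars.lowerChar c]) from by
            simp [pvStepB, ha],
          ih, pvSW, if_neg (by simp [lower_alpha_not_space c ha])]
      · by_cases hs : PySem.Chars.isspace c
        · have h1 : pvF (c :: rest) = c :: pvF rest := by simp [pvF, hs, space_lower c hs]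
          rw [h1, List.foldl_cons,
            show pvStepB (ws, buf) c = (pvFinB (ws, buf), []) from by
              simp [pvStepB, pvFinB, ha, hs],
            ih, pvSW, if_pos hs, flushB]
          by_cases hb : buf = []
          · simp [hb]
          · simp only [if_neg hb, List.filter_cons]
            by_cases hk : pvKeep buf = true <;> simp [hk]
        · have h1 : pvF (c :: rest) = pvF rest := by simp [pvF, ha, hs]
          rw [h1, List.foldl_cons, show pvStepB (ws, buf) c = (ws, buf) from by
            simp [pvStepB, ha, hs], ih]

theorem mem_intercalate (ws : List (List Char)) (c : Char)
    (h : c ∈ List.intercalate [' '] ws) : (∃ w ∈ ws, c ∈ w) ∨ c = ' ' := by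
  induction ws with
  | nil => simp [List.intercalate] at h
  | cons w rest ih =>
      cases rest with
      | nil =>
          rw [intercalate_single] at h
          exact Or.inl ⟨w, by simp, h⟩
      | cons w2 rest2 =>
          rw [intercalate_cons2] at h
          rcases List.mem_append.mp h with h | h
          · exact Or.inl ⟨w, by simp, h⟩
          · rcases List.mem_append.mp h with h | h
            · simp at h; exact Or.inr h
            · rcases ih h with ⟨w', hw', hc⟩ | h
              · exact Or.inl ⟨w', by simp [hw'], hc⟩
              · exact Or.inr h

-- ===== VERDICT (by name: the statement is the Claim_ definition above) =====
theorem transform_string_spec : Claim_equal_transform_string := by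
  intro string _
  unfold Spec_transform_string transform_string transform_string_alt
  have hfold : ∀ (st : List (List Char) × List Char) c,
      (fun st c =>
        if PySem.Chars.isalpha c then (st.1, st.2 ++ [PySem.Chars.lowerChar c])
        else if PySem.Chars.isspace c then
          ((if st.2.isEmpty then st.1
            else if PySem.Set.contains pvStopB st.2 then st.1 else st.1 ++ [st.2]),
           ([] : List Char))
        else st) st c = pvStepB st c := fun _ _ => rfl
  set s := string.toList with hsdef
  -- B's word list
  have hb : (let st := s.foldl pvStepB ([], []);
      if st.2.isEmpty then st.1
      else if PySem.Set.contains pvStopB st.2 then st.1 else st.1 ++ [st.2])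
      = (pvSW [] (pvF s)).filter pvKeep := by
    simpa [pvFinB] using bfoldB s [] []
  -- A's word list
  have hwords := pvSW_words s [] (by simp)
  have hGF : (PySem.Chars.join [' '] (PySem.Chars.split₀ s)).filter
        (fun c => PySem.Chars.isalpha c || c == ' ')
      = (PySem.Chars.join [' '] (PySem.Chars.split₀ s)).filter
        (fun c => PySem.Chars.isalpha c || PySem.Chars.isspace c) := by
    apply List.filter_congr
    intro c hc
    rw [PySem.Chars.join] at hc
    rcases mem_intercalate _ c hc with ⟨w, hw, hcw⟩ | h
    · rw [split₀_eq_pvSW] at hw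
      have := (hwords w hw).2 c hcw
      simp only [this, Bool.or_false]
      by_cases he : c = ' '
      · subst he; simp [PySem.Chars.isspace] at this
      · simp [he]
    · subst h; simp [PySem.Chars.isspace]
  have ha : PySem.Chars.split₀
        (((PySem.Chars.join [' '] (PySem.Chars.split₀ s)).filter
          (fun c => PySem.Chars.isalpha c || c == ' ')).map PySem.Chars.lowerChar)
      = pvSW [] (pvF (PySem.Chars.join [' '] (PySem.Chars.split₀ s))) := by
    rw [hGF, split₀_eq_pvSW]
    rfl
  have hround : pvSW [] (PySem.Chars.join [' '] (PySem.Chars.split₀ s)) = pvSW [] s := by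
    rw [PySem.Chars.join, split₀_eq_pvSW, roundtrip _ hwords]
  have key : PySem.Chars.split₀
        (((PySem.Chars.join [' '] (PySem.Chars.split₀ s)).filter
          (fun c => PySem.Chars.isalpha c || c == ' ')).map PySem.Chars.lowerChar)
      = pvSW [] (pvF s) := by
    rw [ha, show pvSW [] (pvF (PySem.Chars.join [' '] (PySem.Chars.split₀ s)))
        = pvH (pvSW [] (PySem.Chars.join [' '] (PySem.Chars.split₀ s))) from by
      simpa [pvf] using lemmaX (PySem.Chars.join [' '] (PySem.Chars.split₀ s)) [],
      hround, ← lemmaX s []]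
    rfl
  simp only [hfold]
  rw [hb, key]
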